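-- pv_equiv track=rewrite | github.com/helloworldjay/Algorithm | test.py | solution
-- ===== SOURCE A (Python) =====
-- def is_starting_with_program_name(program: str, command: str) -> bool: # 명령어가 제대로된 프로그램 이름으로 시작하는지 확인
--     if command.startswith(program):
--         return True
--     return False
--
-- def is_valid_command_by_rule(flag_rule_dictionary_by_flag_name: dict, command_to_check: str) -> bool: # 커맨드를 순회하며 flag에 맞는 argument인지 확
--     commands_list = list(command_to_check.split())[1:]
--     index = 0
--     while index < len(commands_list):
--         if commands_list[index] in flag_rule_dictionary_by_flag_name:
--             flag_rule = flag_rule_dictionary_by_flag_name[commands_list[index]]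
--             if flag_rule == "STRING":
--                 if index == len(commands_list)-1 or not commands_list[index+1].isalpha():
--                     return False
--                 index += 2
--             elif flag_rule == "NUMBER":
--                 if index == len(commands_list)-1:
--                     return False
--                 for one_command in commands_list[index+1]:
--                     if one_command not in "1234567890":
--                         return False
--                 index += 2
--             elif flag_rule == "NULL":
--                 if index != len(commands_list)-1 and commands_list[index+1] not in flag_rule_dictionary_by_flag_name:
--                     return False
--                 index += 1
--         else:
--             return False
--     return True
--
-- def make_flag_rules_dictionary(flag_rules: list) -> dict: # flag_rules를 dictionary로 변경하여 반환
--     flag_rules_dictionary_by_flag_name = {}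
--     for flag_rule in flag_rules:
--         flag_name, flag_argument_type = flag_rule.split()
--         flag_rules_dictionary_by_flag_name[flag_name] = flag_argument_type
--     return flag_rules_dictionary_by_flag_name
--
-- def solution(program, flag_rules, commands):
--     validation_check_result = [False for _ in range(len(commands))] # 개별 커맨드의 적합도 결과 생성
--     flag_rule_dictionary_by_flag_name = make_flag_rules_dictionary(flag_rules) # 주어진 flag_rules를 dictionary로 변경
--     for index in range(len(commands)):
--         command_to_check = commands[index] # 현재 체크할 커맨드
--         if not is_starting_with_program_name(program, command_to_check): # 커맨드가 프로그램 이름으로 시작하지 않으면 잘못된 명령이므로 TRUE로 변경없이 넘어감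
--             continue
--         if is_valid_command_by_rule(flag_rule_dictionary_by_flag_name, command_to_check): # rule에 맞는 커맨드이면 check 결과를 True로 변경
--             validation_check_result[index] = True
--     return validation_check_result
-- ===== SOURCE B (Python) =====
-- def solution(program, flag_rules, commands):
--     rules = dict(r.split() for r in flag_rules)
--
--     def ok(toks):
--         # dynamic programming from the end of the token list:
--         # valid[i] says whether tokens i..n-1 form a valid flag/argument tail.
--         # (A's lookahead "next token after a NULL flag must be a known flag" is
--         # redundant: an unknown token in flag position makes the tail invalid anyway.)
--         n = len(toks)
--         valid = [False] * (n + 1)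
--         valid[n] = True
--         for i in range(n - 1, -1, -1):
--             rule = rules.get(toks[i])
--             if rule == "NULL":
--                 valid[i] = valid[i + 1]
--             elif rule == "STRING":
--                 valid[i] = i + 1 < n and toks[i + 1].isalpha() and valid[i + 2]
--             elif rule == "NUMBER":
--                 valid[i] = i + 1 < n and toks[i + 1].isdigit() and valid[i + 2]
--         return valid[0]
--
--     return [c.startswith(program) and ok(c.split()[1:]) for c in commands]
-- ===== Notes on version B (the rewrite author's own statement) =====
-- stated objective: alternative
-- what changed: Replaced A's forward index-jumping while loop with early returns by a backward dynamic-programming table valid[i] ('tokens i.. form a valid tail') filled from the end of the token list, dropping A's provably redundant NULL-flag lookahead ('next token must be a known flag'), with the outer loop as a comprehension.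
-- outside the precondition, e.g. on solution('prog', ['-x'], ['prog']): A raises ValueError, B raises ValueError
import Mathlib
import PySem

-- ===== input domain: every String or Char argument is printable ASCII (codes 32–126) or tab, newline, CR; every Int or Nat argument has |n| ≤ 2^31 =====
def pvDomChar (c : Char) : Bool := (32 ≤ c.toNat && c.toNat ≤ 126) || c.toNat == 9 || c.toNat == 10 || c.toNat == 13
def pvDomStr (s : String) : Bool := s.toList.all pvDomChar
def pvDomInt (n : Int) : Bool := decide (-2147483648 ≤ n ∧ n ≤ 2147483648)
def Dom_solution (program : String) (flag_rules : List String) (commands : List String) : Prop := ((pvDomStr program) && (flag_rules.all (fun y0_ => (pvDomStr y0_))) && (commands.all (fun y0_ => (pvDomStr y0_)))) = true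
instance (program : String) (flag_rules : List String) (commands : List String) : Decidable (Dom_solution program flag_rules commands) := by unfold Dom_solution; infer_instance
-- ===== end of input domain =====

-- B validates each command with a backward dynamic-programming table over its tokens (valid[i] =
-- "tokens i.. form a valid tail", filled from the end) instead of A's forward index-jumping while
-- loop with early returns; A's NULL-flag lookahead is dropped as redundant (objective: alternative).

-- ===== PORT A =====
def pvIsStartingA (program : String) (command : String) : Bool :=
  if PySem.Str.startswith command program then true else false

-- inner 'for one_command in commands_list[index+1]: if one_command not in "1234567890": return False'
def pvDigitsOkA : List Char → Bool
  | [] => true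
  | c :: cs => if !("1234567890".toList.contains c) then false else pvDigitsOkA cs

def pvValidA (d : PySem.Dict String String) : List String → Bool
  | [] => true
  | t :: rest =>
    match d.get? t with
    | none => false
    | some rule =>
      if rule == "STRING" then
        match rest with
        | [] => false
        | u :: rest' => if !(PySem.Str.strIsalpha u) then false else pvValidA d rest'
      else if rule == "NUMBER" then
        match rest with
        | [] => false
        | u :: rest' => if pvDigitsOkA u.toList then pvValidA d rest' else false
      else if rule == "NULL" then
        match rest with
        | [] => true   -- index += 1: the while condition then fails and the loop returns True
        | u :: tl => if !(d.contains u) then false else pvValidA d (u :: tl)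
      else false  -- Python's while loop never advances here (diverges when reached); Pre_ excludes such rule types

def pvMakeDictA (flag_rules : List String) : PySem.Dict String String :=
  flag_rules.foldl (fun d r =>
    match PySem.Str.split₀ r with
    | [name, typ] => d.insert name typ
    | _ => d   -- Python raises ValueError on unpacking here; excluded by Pre_
  ) PySem.Dict.empty

def solution (program : String) (flag_rules : List String) (commands : List String) : List Bool :=
  let d := pvMakeDictA flag_rules
  commands.map (fun c =>
    if !(pvIsStartingA program c) then false
    else pvValidA d ((PySem.Str.split₀ c).drop 1))

-- ===== PORT B =====
-- dict(r.split() for r in flag_rules): inserts the (name, type) pair of each rule in order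
def pvRulesB (flag_rules : List String) : PySem.Dict String String :=
  flag_rules.foldl (fun d r =>
    match PySem.Str.split₀ r with
    | [name, typ] => d.insert name typ
    | _ => d   -- Python raises ValueError here; excluded by Pre_
  ) PySem.Dict.empty

-- the DP table, built back to front: pvTableB rules ts = [valid[i], valid[i+1], …, valid[n]]
-- where 'i + 1 < n' is '!rest.isEmpty', 'toks[i+1]' is 'rest.headD', 'valid[i+2]' is 'v.getD 1'
def pvTableB (rules : PySem.Dict String String) : List String → List Bool
  | [] => [true]
  | t :: rest =>
    let v := pvTableB rules rest
    let rule := rules.get? t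
    let cur :=
      if rule == some "NULL" then v.headD false
      else if rule == some "STRING" then
        !rest.isEmpty && PySem.Str.strIsalpha (rest.headD "") && v.getD 1 false
      else if rule == some "NUMBER" then
        !rest.isEmpty && PySem.Str.strIsdigit (rest.headD "") && v.getD 1 false
      else false
    cur :: v

def solution_alt (program : String) (flag_rules : List String) (commands : List String) : List Bool :=
  let rules := pvRulesB flag_rules
  commands.map (fun c =>
    PySem.Str.startswith c program &&
      (pvTableB rules ((PySem.Str.split₀ c).drop 1)).headD false)

-- ===== PRECONDITION & SPEC =====
def pvRuleTypes : List String := ["STRING", "NUMBER", "NULL"]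

def pvCmdTokens (commands : List String) : List String :=
  commands.flatMap (fun c => (PySem.Str.split₀ c).drop 1)

-- Pre_ excludes ill-formed flag_rules entries: ones that do not split into exactly two tokens
-- (A raises ValueError while building its dictionary) and ones whose argument type is not
-- STRING/NUMBER/NULL while the flag name occurs as a command token (A's while loop never
-- advances on such a flag, so A diverges whenever the flag is actually consulted).
def Pre_solution (program : String) (flag_rules : List String) (commands : List String) : Prop :=
  ∀ r ∈ flag_rules, (PySem.Str.split₀ r).length = 2 ∧
    ((PySem.Str.split₀ r).getD 1 "" ∈ pvRuleTypes ∨ (PySem.Str.split₀ r).getD 0 "" ∉ pvCmdTokens commands)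

instance (program : String) (flag_rules : List String) (commands : List String) : Decidable (Pre_solution program flag_rules commands) := by
  unfold Pre_solution; infer_instance

def pvWitness_solution : String × List String × List String :=
  ("prog", ["-f STRING", "-n NUMBER", "-v NULL"],
   ["prog -f abc -n 12 -v", "other -f abc", "prog -x", "prog -f 9", "prog -n"])

def Spec_solution (program : String) (flag_rules : List String) (commands : List String) (out : List Bool) : Prop := out = solution_alt program flag_rules commands
instance (program : String) (flag_rules : List String) (commands : List String) (out : List Bool) : Decidable (Spec_solution program flag_rules commands out) := by unfold Spec_solution; infer_instance

-- ===== CLAIM (what is proved, stated in full; the proofs are below) =====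
def Claim_equal_solution : Prop := ∀ (program : String) (flag_rules : List String) (commands : List String), Dom_solution program flag_rules commands → Pre_solution program flag_rules commands → Spec_solution program flag_rules commands (solution program flag_rules commands)

-- ===== LEMMAS AND PROOFS =====

-- Python's 'c in "1234567890"' for a single char agrees with str.isdigit on a char
lemma pvDigitChar (c : Char) : ("1234567890".toList.contains c) = PySem.Chars.isdigit c := by
  have hl : "1234567890".toList = ['1','2','3','4','5','6','7','8','9','0'] := by decide
  rw [Bool.eq_iff_iff]
  simp only [hl, PySem.Chars.isdigit, List.contains_eq_mem, decide_eq_true_eq, List.mem_cons,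
    List.not_mem_nil, or_false, Bool.and_eq_true, Char.le_def, UInt32.le_iff_toNat_le,
    Char.ext_iff, ← UInt32.toNat_inj]
  have h0 : ('0').val.toNat = 48 := by decide
  have h1 : ('1').val.toNat = 49 := by decide
  have h2 : ('2').val.toNat = 50 := by decide
  have h3 : ('3').val.toNat = 51 := by decide
  have h4 : ('4').val.toNat = 52 := by decide
  have h5 : ('5').val.toNat = 53 := by decide
  have h6 : ('6').val.toNat = 54 := by decide
  have h7 : ('7').val.toNat = 55 := by decide
  have h8 : ('8').val.toNat = 56 := by decide
  have h9 : ('9').val.toNat = 57 := by decide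
  rw [h0, h1, h2, h3, h4, h5, h6, h7, h8, h9]
  omega

-- A's hand-rolled digit loop agrees with str.isdigit on nonempty strings
lemma pvDigitsOkA_eq_strIsdigit (cs : List Char) (h : cs ≠ []) :
    pvDigitsOkA cs = PySem.Chars.strIsdigit cs := by
  have hall : ∀ l : List Char, pvDigitsOkA l = l.all PySem.Chars.isdigit := by
    intro l
    induction l with
    | nil => rfl
    | cons c l ih =>
      simp only [pvDigitsOkA, pvDigitChar, List.all_cons, ← ih]
      cases PySem.Chars.isdigit c <;> simp
  rw [hall, PySem.Chars.strIsdigit]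
  simp [h]

-- every token produced by str.split() is nonempty
lemma pvGoTokensNeNil (s : List Char) : ∀ (cur : List Char) (acc : List (List Char)),
    (∀ w ∈ acc, w ≠ ([] : List Char)) →
    ∀ w ∈ PySem.Chars.split₀.go s cur acc, w ≠ [] := by
  induction s with
  | nil =>
    intro cur acc hacc w hw
    unfold PySem.Chars.split₀.go at hw
    split at hw
    · exact hacc w (List.mem_reverse.mp hw)
    · rename_i hcur
      rcases List.mem_cons.mp (List.mem_reverse.mp hw) with h | h
      · subst h
        simp only [ne_eq, List.reverse_eq_nil_iff]
        simpa [List.isEmpty_iff] using hcur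
      · exact hacc w h
  | cons c s ih =>
    intro cur acc hacc w hw
    unfold PySem.Chars.split₀.go at hw
    split at hw
    · split at hw
      · exact ih [] acc hacc w hw
      · rename_i hcur
        refine ih [] _ ?_ w hw
        intro v hv
        rcases List.mem_cons.mp hv with h | h
        · subst h
          simp only [ne_eq, List.reverse_eq_nil_iff]
          simpa [List.isEmpty_iff] using hcur
        · exact hacc v h
    · exact ih (c :: cur) acc hacc w hw

lemma pvSplitTokNeNil (s : String) : ∀ t ∈ PySem.Str.split₀ s, t.toList ≠ [] := by
  intro t ht
  simp only [PySem.Str.split₀, List.mem_map] at ht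
  obtain ⟨w, hw, rfl⟩ := ht
  have := pvGoTokensNeNil s.toList [] [] (by simp) w hw
  simpa using this

-- every binding of A's dictionary comes from some flag rule splitting as [name, typ]
lemma pvDictProv (l : List String) : ∀ (d0 : PySem.Dict String String) (name typ : String),
    (l.foldl (fun d r =>
      match PySem.Str.split₀ r with
      | [name, typ] => d.insert name typ
      | _ => d) d0).get? name = some typ →
    (∃ r ∈ l, PySem.Str.split₀ r = [name, typ]) ∨ d0.get? name = some typ := by
  induction l with
  | nil => intro d0 name typ h; exact Or.inr h
  | cons r l ih =>
    intro d0 name typ h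
    simp only [List.foldl_cons] at h
    rcases ih _ name typ h with h' | h'
    · obtain ⟨r', hr', hs⟩ := h'
      exact Or.inl ⟨r', List.mem_cons_of_mem _ hr', hs⟩
    · rcases hs : PySem.Str.split₀ r with _ | ⟨a, _ | ⟨b, _ | _⟩⟩ <;> rw [hs] at h'
      · exact Or.inr h'
      · exact Or.inr h'
      · rw [PySem.Dict.get?_insert] at h'
        by_cases hn : name = a
        · subst hn
          simp at h'
          exact Or.inl ⟨r, List.mem_cons_self .., by rw [hs, h']⟩
        · rw [if_neg hn] at h'
          exact Or.inr h'
      · exact Or.inr h'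

-- B builds the same dictionary as A
lemma pvRulesB_eq (flag_rules : List String) : pvRulesB flag_rules = pvMakeDictA flag_rules := rfl

lemma pvValidA_nil (d : PySem.Dict String String) : pvValidA d [] = true := by
  rw [pvValidA.eq_def]

lemma pvValidA_cons (d : PySem.Dict String String) (t : String) (rest : List String) :
    pvValidA d (t :: rest) =
      (match d.get? t with
       | none => false
       | some rule =>
         if rule == "STRING" then
           (match rest with
            | [] => false
            | u :: rest' => if !(PySem.Str.strIsalpha u) then false else pvValidA d rest')
         else if rule == "NUMBER" then
           (match rest with
            | [] => false
            | u :: rest' => if pvDigitsOkA u.toList then pvValidA d rest' else false)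
         else if rule == "NULL" then
           (match rest with
            | [] => true
            | u :: tl => if !(d.contains u) then false else pvValidA d (u :: tl))
         else false) := by
  rw [pvValidA.eq_def]

lemma pvTableB_cons (d : PySem.Dict String String) (t : String) (rest : List String) :
    pvTableB d (t :: rest) =
      (if d.get? t == some "NULL" then (pvTableB d rest).headD false
       else if d.get? t == some "STRING" then
         !rest.isEmpty && PySem.Str.strIsalpha (rest.headD "") && (pvTableB d rest).getD 1 false
       else if d.get? t == some "NUMBER" then
         !rest.isEmpty && PySem.Str.strIsdigit (rest.headD "") && (pvTableB d rest).getD 1 false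
       else false) :: pvTableB d rest := by
  rw [pvTableB.eq_def]

-- getD 1 of the table at u::rest' is the head of the table at rest' (simp-normal form)
lemma pvTable_getD1 (d : PySem.Dict String String) (u : String) (rest' : List String) :
    (pvTableB d (u :: rest'))[1]?.getD false = (pvTableB d rest').head?.getD false := by
  rw [pvTableB_cons]
  cases pvTableB d rest' <;> simp

-- the heart of the proof: the head of B's back-to-front DP table equals A's forward loop on any
-- token list of nonempty tokens whose successful dictionary lookups yield a known rule type
lemma pvMain (d : PySem.Dict String String) : ∀ (n : ℕ) (ts : List String), ts.length ≤ n →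
    (∀ t ∈ ts, t.toList ≠ []) →
    (∀ t ∈ ts, ∀ r, d.get? t = some r → r ∈ pvRuleTypes) →
    (pvTableB d ts).headD false = pvValidA d ts := by
  intro n
  induction n with
  | zero =>
    intro ts hlen _ _
    rw [List.length_eq_zero_iff.mp (Nat.le_zero.mp hlen)]
    simp [pvValidA_nil, pvTableB]
  | succ n ih =>
    intro ts hlen h1 h2
    match ts with
    | [] => simp [pvValidA_nil, pvTableB]
    | t :: rest =>
      cases hg : d.get? t with
      | none => simp [pvValidA_cons, pvTableB_cons, hg]
      | some rule =>
        have hr := h2 t (List.mem_cons_self ..) rule hg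
        simp only [pvRuleTypes, List.mem_cons, List.not_mem_nil, or_false] at hr
        rcases hr with rfl | rfl | rfl
        · -- STRING
          match rest with
          | [] => simp [pvValidA_cons, pvTableB_cons, hg]
          | u :: rest' =>
            have hrec := ih rest' (by simp at hlen ⊢; omega)
              (fun x hx => h1 x (by simp [hx])) (fun x hx => h2 x (by simp [hx]))
            have hrec' : (pvTableB d rest').head?.getD false = pvValidA d rest' := by
              simpa using hrec
            rw [pvTableB_cons, List.headD_cons]
            cases hal : PySem.Str.strIsalpha u <;>
              simp [pvValidA_cons, hg, pvTable_getD1, hrec']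
        · -- NUMBER
          match rest with
          | [] => simp [pvValidA_cons, pvTableB_cons, hg]
          | u :: rest' =>
            have hrec := ih rest' (by simp at hlen ⊢; omega)
              (fun x hx => h1 x (by simp [hx])) (fun x hx => h2 x (by simp [hx]))
            have hrec' : (pvTableB d rest').head?.getD false = pvValidA d rest' := by
              simpa using hrec
            have hdig := pvDigitsOkA_eq_strIsdigit u.toList (h1 u (by simp))
            rw [pvTableB_cons, List.headD_cons]
            cases hd : PySem.Chars.strIsdigit u.toList <;>
              simp [pvValidA_cons, PySem.Str.strIsdigit, hg, hdig, hd, pvTable_getD1, hrec']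
        · -- NULL
          match rest with
          | [] => simp [pvValidA_cons, hg, pvTableB]
          | u :: tl =>
            have hrec := ih (u :: tl) (by simp at hlen ⊢; omega)
              (fun x hx => h1 x (by simp [hx])) (fun x hx => h2 x (by simp [hx]))
            have hrec' : (pvTableB d (u :: tl)).head?.getD false = pvValidA d (u :: tl) := by
              simpa using hrec
            rw [pvTableB_cons, List.headD_cons]
            cases hg2 : d.get? u with
            | none =>
              have hc : d.contains u = false := by
                rw [PySem.Dict.contains_eq_isSome_get?, hg2]; rfl
              have hv : pvValidA d (u :: tl) = false := by rw [pvValidA_cons, hg2]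
              conv_rhs => rw [pvValidA_cons]
              simp [hg, hc, hrec', hv]
            | some r2 =>
              have hc : d.contains u = true := by
                rw [PySem.Dict.contains_eq_isSome_get?, hg2]; rfl
              conv_rhs => rw [pvValidA_cons]
              simp [hg, hc, hrec']

-- tokens of a command are in pvCmdTokens
lemma pvMemCmdTokens (commands : List String) (c : String) (hc : c ∈ commands)
    (t : String) (ht : t ∈ (PySem.Str.split₀ c).drop 1) : t ∈ pvCmdTokens commands := by
  exact List.mem_flatMap.mpr ⟨c, hc, ht⟩

-- ===== VERDICT (by name: the statement is the Claim_ definition above) =====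
theorem solution_spec : Claim_equal_solution := by
  intro program flag_rules commands _ hpre
  unfold Spec_solution solution solution_alt
  rw [pvRulesB_eq]
  apply List.map_congr_left
  intro c hc
  have hsw : pvIsStartingA program c = PySem.Str.startswith c program := by
    unfold pvIsStartingA; split <;> simp_all
  rw [hsw]
  cases PySem.Str.startswith c program with
  | false => simp
  | true =>
    simp only [Bool.not_true, Bool.false_eq_true, if_false, Bool.true_and]
    refine (pvMain _ ((PySem.Str.split₀ c).drop 1).length _ le_rfl ?_ ?_).symm
    · intro t ht
      exact pvSplitTokNeNil c t (List.mem_of_mem_drop ht)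
    · intro t ht r hg
      rcases pvDictProv flag_rules PySem.Dict.empty t r hg with h | h
      · obtain ⟨fr, hfr, hs⟩ := h
        rcases (hpre fr hfr).2 with h' | h'
        · rw [hs] at h'; simpa using h'
        · rw [hs] at h'
          exact absurd (pvMemCmdTokens commands c hc t ht) (by simpa using h')
      · simp [PySem.Dict.get?_empty] at h
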